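-- pv_equiv track=rewrite | github.com/Dannyrojas6/Lumina | core/gui/services/runtime_config_service.py | _replace_smart_battle_enabled
-- ===== SOURCE A (Python) =====
-- def _replace_smart_battle_enabled(text: str, enabled: bool) -> str:
--     lines = text.splitlines()
--     for index, line in enumerate(lines):
--         if line.startswith("smart_battle:"):
--             block_end = index + 1
--             while block_end < len(lines):
--                 current = lines[block_end]
--                 if current and not current.startswith(" "):
--                     break
--                 block_end += 1
--             for child_index in range(index + 1, block_end):
--                 stripped = lines[child_index].strip()
--                 if not stripped.startswith("enabled:"):
--                     continue
--                 comment = _extract_inline_comment(lines[child_index])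
--                 lines[child_index] = f"  enabled: {_format_bool(enabled)}{comment}"
--                 return "\n".join(lines) + ("\n" if text.endswith("\n") else "")
--             lines.insert(index + 1, f"  enabled: {_format_bool(enabled)}")
--             return "\n".join(lines) + ("\n" if text.endswith("\n") else "")
--
--     if lines and lines[-1].strip():
--         lines.append("")
--     lines.append("smart_battle:")
--     lines.append(f"  enabled: {_format_bool(enabled)}")
--     return "\n".join(lines) + ("\n" if text.endswith("\n") else "")
--
-- def _format_bool(value: bool) -> str:
--     return "true" if value else "false"
--
-- def _extract_inline_comment(line: str) -> str:
--     if "#" not in line: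
--         return ""
--     comment_index = line.index("#")
--     return line[comment_index - 1 :] if comment_index > 0 and line[comment_index - 1] == " " else line[comment_index:]
-- ===== SOURCE B (Python) =====
-- def _format_bool(value: bool) -> str:
--     return "true" if value else "false"
--
--
-- def _extract_inline_comment(line: str) -> str:
--     if "#" not in line:
--         return ""
--     comment_index = line.index("#")
--     return line[comment_index - 1 :] if comment_index > 0 and line[comment_index - 1] == " " else line[comment_index:]
--
--
-- def _replace_smart_battle_enabled(text: str, enabled: bool) -> str:
--     entry = "  enabled: " + _format_bool(enabled)
--     lines = text.splitlines()
--     suffix = "\n" if text.endswith("\n") else ""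
--     out = []
--     it = iter(lines)
--     for line in it:
--         if line.startswith("smart_battle:"):
--             out.append(line)
--             kept = []  # block lines already scanned (stay in place)
--             for cur in it:
--                 if cur and not cur.startswith(" "):
--                     # block ended with no enabled line: entry goes right after the header
--                     return "\n".join(out + [entry] + kept + [cur] + list(it)) + suffix
--                 if cur.strip().startswith("enabled:"):
--                     return "\n".join(out + kept + [entry + _extract_inline_comment(cur)] + list(it)) + suffix
--                 kept.append(cur)
--             return "\n".join(out + [entry] + kept) + suffix
--         out.append(line)
--     tail = [""] if lines and lines[-1].strip() else []
--     return "\n".join(lines + tail + ["smart_battle:", entry]) + suffix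
-- ===== Notes on version B (the rewrite author's own statement) =====
-- stated objective: alternative
-- what changed: A precomputes the block end with a while loop, then re-scans that index range for an enabled: child and edits lines in place via set/insert; B makes one fused forward pass with an iterator (no index arithmetic, no block_end precomputation) and builds the result list by concatenation, keeping the same insertion point and fallback.
import Mathlib
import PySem

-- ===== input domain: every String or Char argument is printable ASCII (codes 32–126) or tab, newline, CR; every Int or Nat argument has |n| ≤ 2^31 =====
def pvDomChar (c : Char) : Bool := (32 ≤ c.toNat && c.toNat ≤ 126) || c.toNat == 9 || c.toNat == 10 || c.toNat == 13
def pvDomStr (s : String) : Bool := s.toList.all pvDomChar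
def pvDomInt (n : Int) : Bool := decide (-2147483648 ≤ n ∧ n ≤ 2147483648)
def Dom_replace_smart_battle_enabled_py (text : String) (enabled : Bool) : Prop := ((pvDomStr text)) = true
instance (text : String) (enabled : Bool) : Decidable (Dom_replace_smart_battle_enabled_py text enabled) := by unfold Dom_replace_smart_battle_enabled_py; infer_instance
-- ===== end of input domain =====

-- B replaces A's two-phase index machinery (while-loop block_end, range re-scan, in-place set/insert)
-- by one fused forward pass building the result by concatenation; same return value (objective: alternative).

-- ===== PORT A =====
-- shared module helpers (identical in Source A and Source B)
def fmtBool (value : Bool) : String := if value then "true" else "false"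

def extractComment (line : String) : String :=
  if !(PySem.Str.isIn "#" line) then ""
  else
    let commentIndex : Int := PySem.Str.find line "#"
    if commentIndex > 0 && (PySem.Str.pyGet? line (commentIndex - 1) == some ' ') then
      PySem.Str.slice line (some (commentIndex - 1)) none
    else
      PySem.Str.slice line (some commentIndex) none

-- the 'while block_end < len(lines)' loop
def blockEndA (lines : List String) (be : Nat) : Nat :=
  if h : be < lines.length then
    if !(lines[be] == "") && !(PySem.Str.startswith lines[be] " ") then be
    else blockEndA lines (be + 1)
  else be
termination_by lines.length - be

-- the 'for child_index in range(index+1, block_end)' loop: first child whose strip starts with "enabled:"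
def scanA (lines : List String) (ci be : Nat) : Option Nat :=
  if ci < be then
    if PySem.Str.startswith (PySem.Str.strip (lines.getD ci "")) "enabled:" then some ci
    else scanA lines (ci + 1) be
  else none
termination_by be - ci

-- the outer 'for index, line in enumerate(lines)' search for the first smart_battle: line
def findSBA (lines : List String) (i : Nat) : Option Nat :=
  if h : i < lines.length then
    if PySem.Str.startswith lines[i] "smart_battle:" then some i else findSBA lines (i + 1)
  else none
termination_by lines.length - i

def replace_smart_battle_enabled_py (text : String) (enabled : Bool) : String :=
  let lines := PySem.Str.splitlines text
  let suffix := if PySem.Str.endswith text "\n" then "\n" else ""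
  match findSBA lines 0 with
  | some index =>
      let blockEnd := blockEndA lines (index + 1)
      match scanA lines (index + 1) blockEnd with
      | some ci =>
          let newLine := "  enabled: " ++ fmtBool enabled ++ extractComment (lines.getD ci "")
          PySem.Str.join "\n" (lines.set ci newLine) ++ suffix
      | none =>
          PySem.Str.join "\n" (PySem.List.insert lines ((index : Int) + 1) ("  enabled: " ++ fmtBool enabled)) ++ suffix
  | none =>
      let lines2 := if lines ≠ [] ∧ PySem.Str.strip (lines.getLastD "") ≠ "" then lines ++ [""] else lines
      PySem.Str.join "\n" (lines2 ++ ["smart_battle:", "  enabled: " ++ fmtBool enabled]) ++ suffix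

-- ===== PORT B =====
-- inner 'for cur in it' loop of Source B: out is the already-emitted prefix, kept the scanned block lines
def altBlock (entry : String) (out kept tail : List String) : List String :=
  match tail with
  | [] => out ++ [entry] ++ kept
  | cur :: rest =>
      if !(cur == "") && !(PySem.Str.startswith cur " ") then out ++ [entry] ++ kept ++ cur :: rest
      else if PySem.Str.startswith (PySem.Str.strip cur) "enabled:" then
        out ++ kept ++ [entry ++ extractComment cur] ++ rest
      else altBlock entry out (kept ++ [cur]) rest

-- outer 'for line in it' loop of Source B
def altOuter (entry : String) (out ls : List String) : Option (List String) :=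
  match ls with
  | [] => none
  | line :: rest =>
      if PySem.Str.startswith line "smart_battle:" then some (altBlock entry (out ++ [line]) [] rest)
      else altOuter entry (out ++ [line]) rest

def replace_smart_battle_enabled_py_alt (text : String) (enabled : Bool) : String :=
  let entry := "  enabled: " ++ fmtBool enabled
  let lines := PySem.Str.splitlines text
  let suffix := if PySem.Str.endswith text "\n" then "\n" else ""
  match altOuter entry [] lines with
  | some newLines => PySem.Str.join "\n" newLines ++ suffix
  | none =>
      let tail := if lines ≠ [] ∧ PySem.Str.strip (lines.getLastD "") ≠ "" then [""] else []
      PySem.Str.join "\n" (lines ++ tail ++ ["smart_battle:", entry]) ++ suffix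

-- ===== PRECONDITION & SPEC =====
def Spec_replace_smart_battle_enabled_py (text : String) (enabled : Bool) (out : String) : Prop := out = replace_smart_battle_enabled_py_alt text enabled
instance (text : String) (enabled : Bool) (out : String) : Decidable (Spec_replace_smart_battle_enabled_py text enabled out) := by unfold Spec_replace_smart_battle_enabled_py; infer_instance

-- ===== CLAIM (what is proved, stated in full; the proofs are below) =====
def Claim_equal_replace_smart_battle_enabled_py : Prop := ∀ (text : String) (enabled : Bool), Dom_replace_smart_battle_enabled_py text enabled → Spec_replace_smart_battle_enabled_py text enabled (replace_smart_battle_enabled_py text enabled)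

-- ===== LEMMAS AND PROOFS =====

theorem blockEndA_ge (lines : List String) (be : Nat) : be ≤ blockEndA lines be := by
  unfold blockEndA
  split
  · split
    · exact le_refl _
    · exact le_trans (Nat.le_succ be) (blockEndA_ge lines (be + 1))
  · exact le_refl _
termination_by lines.length - be

theorem scanA_ge (lines : List String) (ci be j : Nat) (h : scanA lines ci be = some j) : ci ≤ j := by
  unfold scanA at h
  split at h
  · split at h
    · cases h; exact le_refl _
    · exact le_trans (Nat.le_succ ci) (scanA_ge lines (ci + 1) be j h)
  · cases h
termination_by be - ci

theorem findSBA_some_lt (lines : List String) (s i : Nat) (h : findSBA lines s = some i) : i < lines.length := by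
  unfold findSBA at h
  split at h
  · split at h
    · cases h; assumption
    · exact findSBA_some_lt lines (s + 1) i h
  · cases h
termination_by lines.length - s

-- the fused inner pass of B equals A's block_end + range-scan machinery
theorem block_eq (lines : List String) (entry : String) :
    ∀ (tail : List String) (s : Nat) (out kept : List String), lines.drop s = tail →
    altBlock entry out kept tail =
      match scanA lines s (blockEndA lines s) with
      | some ci => out ++ kept ++ ((lines.set ci (entry ++ extractComment (lines.getD ci ""))).drop s)
      | none => out ++ [entry] ++ kept ++ lines.drop s := by
  intro tail
  induction tail with
  | nil =>
      intro s out kept hdrop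
      have hs : ¬ s < lines.length := by
        intro hlt
        have := List.drop_eq_getElem_cons hlt
        rw [hdrop] at this; cases this
      have hbe : blockEndA lines s = s := by rw [blockEndA, dif_neg hs]
      have hscan : scanA lines s s = none := by rw [scanA, if_neg (lt_irrefl s)]
      rw [hbe, hscan, hdrop]
      simp [altBlock]
  | cons cur rest ih =>
      intro s out kept hdrop
      have hs : s < lines.length := by
        by_contra hge
        rw [List.drop_eq_nil_of_le (Nat.le_of_not_lt hge)] at hdrop; cases hdrop
      have hcur : lines[s] = cur := by
        have := List.drop_eq_getElem_cons hs
        rw [hdrop] at this; exact ((List.cons.injEq _ _ _ _).mp this.symm).1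
      have hrest : lines.drop (s + 1) = rest := by
        have := List.drop_eq_getElem_cons hs
        rw [hdrop] at this; exact ((List.cons.injEq _ _ _ _).mp this.symm).2
      have hgetD : lines.getD s "" = cur := by rw [List.getD_eq_getElem lines "" hs, hcur]
      by_cases hmem : (!(cur == "") && !(PySem.Str.startswith cur " ")) = true
      · -- block ends here
        have hbe : blockEndA lines s = s := by
          rw [blockEndA, dif_pos hs, hcur, if_pos hmem]
        have hscan : scanA lines s s = none := by rw [scanA, if_neg (lt_irrefl s)]
        rw [hbe, hscan, hdrop]
        simp only [altBlock]
        rw [if_pos hmem]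
      · -- inside the block
        have hbe : blockEndA lines s = blockEndA lines (s + 1) := by
          rw [blockEndA, dif_pos hs, hcur, if_neg hmem]
        have hbe1 : s + 1 ≤ blockEndA lines (s + 1) := blockEndA_ge lines (s + 1)
        have hlt : s < blockEndA lines s := by omega
        by_cases hq : PySem.Str.startswith (PySem.Str.strip cur) "enabled:" = true
        · -- enabled: line found at s
          have hscan : scanA lines s (blockEndA lines s) = some s := by
            rw [scanA, if_pos hlt, hgetD, if_pos hq]
          rw [hscan]
          have hset : (lines.set s (entry ++ extractComment (lines.getD s ""))).drop s
              = (entry ++ extractComment cur) :: rest := by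
            rw [List.drop_set]
            rw [if_neg (lt_irrefl s), Nat.sub_self, hdrop, hgetD]
            rfl
          simp only []
          rw [hset]
          simp only [altBlock]
          rw [if_neg hmem, if_pos hq]
          simp
        · -- keep scanning
          have hscan : scanA lines s (blockEndA lines s) = scanA lines (s + 1) (blockEndA lines (s + 1)) := by
            conv_lhs => rw [scanA]
            rw [if_pos hlt, hgetD, if_neg hq, hbe]
          have hstep : altBlock entry out kept (cur :: rest) = altBlock entry out (kept ++ [cur]) rest := by
            simp only [altBlock]
            rw [if_neg hmem, if_neg hq]
          rw [hstep, ih (s + 1) out (kept ++ [cur]) hrest, hscan]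
          cases hsc : scanA lines (s + 1) (blockEndA lines (s + 1)) with
          | none =>
              simp only []
              rw [List.drop_eq_getElem_cons hs, hcur]
              simp
          | some ci =>
              simp only []
              have hci : s + 1 ≤ ci := scanA_ge lines (s + 1) (blockEndA lines (s + 1)) ci hsc
              have hslen : s < (lines.set ci (entry ++ extractComment (lines.getD ci ""))).length := by
                simpa using hs
              have hget : (lines.set ci (entry ++ extractComment (lines.getD ci "")))[s] = cur := by
                rw [List.getElem_set_ne (by omega)]; exact hcur
              rw [List.drop_eq_getElem_cons hslen, hget]
              simp

-- the outer pass of B equals A's outer enumerate loop followed by its set/insert edit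
theorem outer_eq (lines : List String) (entry : String) :
    ∀ (tl : List String) (s : Nat), lines.drop s = tl →
    altOuter entry (lines.take s) tl =
      match findSBA lines s with
      | none => none
      | some i => some (match scanA lines (i + 1) (blockEndA lines (i + 1)) with
          | some ci => lines.set ci (entry ++ extractComment (lines.getD ci ""))
          | none => lines.take (i + 1) ++ [entry] ++ lines.drop (i + 1)) := by
  intro tl
  induction tl with
  | nil =>
      intro s hdrop
      have hs : ¬ s < lines.length := by
        intro hlt
        have := List.drop_eq_getElem_cons hlt
        rw [hdrop] at this; cases this
      have hf : findSBA lines s = none := by rw [findSBA, dif_neg hs]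
      rw [hf]; rfl
  | cons line rest ih =>
      intro s hdrop
      have hs : s < lines.length := by
        by_contra hge
        rw [List.drop_eq_nil_of_le (Nat.le_of_not_lt hge)] at hdrop; cases hdrop
      have hline : lines[s] = line := by
        have := List.drop_eq_getElem_cons hs
        rw [hdrop] at this; exact ((List.cons.injEq _ _ _ _).mp this.symm).1
      have hrest : lines.drop (s + 1) = rest := by
        have := List.drop_eq_getElem_cons hs
        rw [hdrop] at this; exact ((List.cons.injEq _ _ _ _).mp this.symm).2
      have htake : lines.take (s + 1) = lines.take s ++ [line] := by
        rw [List.take_succ_eq_append_getElem hs, hline]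
      by_cases hsb : PySem.Str.startswith line "smart_battle:" = true
      · have hf : findSBA lines s = some s := by
          rw [findSBA, dif_pos hs, hline, if_pos hsb]
        rw [hf]
        dsimp only
        have halt : altOuter entry (lines.take s) (line :: rest) =
            some (altBlock entry (lines.take s ++ [line]) [] rest) := by
          simp only [altOuter]
          rw [if_pos hsb]
        rw [halt, ← htake, block_eq lines entry rest (s + 1) (lines.take (s + 1)) [] hrest]
        cases hsc : scanA lines (s + 1) (blockEndA lines (s + 1)) with
        | none => simp
        | some ci =>
            have hci : s + 1 ≤ ci := scanA_ge lines (s + 1) (blockEndA lines (s + 1)) ci hsc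
            have htk : (lines.set ci (entry ++ extractComment (lines.getD ci ""))).take (s + 1)
                = lines.take (s + 1) := List.take_set_of_le hci
            dsimp only
            conv_rhs => rw [← List.take_append_drop (s + 1)
              (lines.set ci (entry ++ extractComment (lines.getD ci "")))]
            rw [htk]
            simp
      · have hf : findSBA lines s = findSBA lines (s + 1) := by
          rw [findSBA, dif_pos hs, hline, if_neg hsb]
        have halt : altOuter entry (lines.take s) (line :: rest) =
            altOuter entry (lines.take s ++ [line]) rest := by
          simp only [altOuter]
          rw [if_neg hsb]
        rw [halt, ← htake, ih (s + 1) hrest, hf]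

-- ===== VERDICT (by name: the statement is the Claim_ definition above) =====
theorem replace_smart_battle_enabled_py_spec : Claim_equal_replace_smart_battle_enabled_py := by
  intro text enabled _
  unfold Spec_replace_smart_battle_enabled_py
  unfold replace_smart_battle_enabled_py replace_smart_battle_enabled_py_alt
  simp only []
  set lines := PySem.Str.splitlines text with hlines
  set entry := "  enabled: " ++ fmtBool enabled with hentry
  have h0 := outer_eq lines entry lines 0 rfl
  simp only [List.take_zero] at h0
  rw [h0]
  cases hf : findSBA lines 0 with
  | none =>
      dsimp only
      split_ifs <;> simp [List.append_assoc]
  | some i =>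
      dsimp only
      cases hsc : scanA lines (i + 1) (blockEndA lines (i + 1)) with
      | some ci =>
          dsimp only
      | none =>
          dsimp only
          have hlen : i + 1 ≤ lines.length := findSBA_some_lt lines 0 i hf
          have hins : PySem.List.insert lines ((i : Int) + 1) entry
              = lines.take (i + 1) ++ entry :: lines.drop (i + 1) := by
            have h := PySem.List.insert_natCast lines (i + 1) entry hlen
            rw [← h]; norm_num
          rw [hins]
          simp
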